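-- pv_equiv track=rewrite | github.com/jerry826/BackTest | risk.py | cal_draw_down_duration
-- ===== SOURCE A (Python) =====
-- def cal_draw_down_duration(drawdown):
-- 	'''
-- 	Calculate draw down duration
-- 	:param drawdown: drawdown series
-- 	:return: draw down duration
-- 	'''
-- 	duration = []
-- 	length = 0
-- 	for i in range(len(drawdown)):
-- 		if drawdown[i] == 0:
-- 			duration.append(length)
-- 			length = 0
-- 		else:
-- 			length += 1
-- 			duration.append(length)
-- 	return duration
-- ===== SOURCE B (Python) =====
-- def cal_draw_down_duration(drawdown):
--     n = len(drawdown)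
--     zeros = [i for i, x in enumerate(drawdown) if x == 0]
--     out = []
--     prev = -1
--     for z in zeros:
--         out.extend(range(1, z - prev))
--         out.append(z - prev - 1)
--         prev = z
--     out.extend(range(1, n - prev))
--     return out
-- ===== Notes on version B (the rewrite author's own statement) =====
-- stated objective: alternative
-- what changed: B first collects the indices of zeros, then builds the output segment-by-segment from index arithmetic (an arithmetic range per gap between consecutive zeros plus the emitted gap length), instead of A's single element-wise scan with a running streak counter.
import Mathlib
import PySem

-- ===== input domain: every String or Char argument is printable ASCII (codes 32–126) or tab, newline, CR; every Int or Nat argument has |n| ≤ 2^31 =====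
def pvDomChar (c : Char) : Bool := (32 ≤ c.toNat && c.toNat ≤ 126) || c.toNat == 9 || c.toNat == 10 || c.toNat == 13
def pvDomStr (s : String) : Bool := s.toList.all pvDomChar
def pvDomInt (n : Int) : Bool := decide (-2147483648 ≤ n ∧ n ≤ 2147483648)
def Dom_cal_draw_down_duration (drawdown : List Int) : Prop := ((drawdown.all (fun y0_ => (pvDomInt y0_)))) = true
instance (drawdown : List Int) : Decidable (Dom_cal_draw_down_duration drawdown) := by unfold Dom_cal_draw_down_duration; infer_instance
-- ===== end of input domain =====

-- B rebuilds the output from the list of zero positions via per-segment arithmetic ranges instead of A's element-wise streak-counter scan (alternative algorithm, same O(n) cost).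


-- ===== PORT A =====
-- A's for-loop over the elements, carrying the mutable `length` counter.
def cal_draw_down_duration_loop : List Int → Int → List Int
  | [], _ => []
  | x :: xs, length =>
      if x = 0 then length :: cal_draw_down_duration_loop xs 0
      else (length + 1) :: cal_draw_down_duration_loop xs (length + 1)

def cal_draw_down_duration (drawdown : List Int) : List Int :=
  cal_draw_down_duration_loop drawdown 0

-- ===== PORT B =====
-- B: collect the indices of zeros, then emit one arithmetic range + gap length per zero, plus a tail range.
def cal_draw_down_duration_alt (drawdown : List Int) : List Int :=
  let n : Int := drawdown.length
  let zeros : List Int :=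
    (PySem.List.enumerate drawdown 0).filterMap (fun p => if p.2 = 0 then some p.1 else none)
  let r := zeros.foldl
    (fun (acc : List Int × Int) z =>
      (acc.1 ++ PySem.List.pyRange 1 (z - acc.2) 1 ++ [z - acc.2 - 1], z))
    ([], -1)
  r.1 ++ PySem.List.pyRange 1 (n - r.2) 1

-- ===== PRECONDITION & SPEC =====
def Spec_cal_draw_down_duration (drawdown : List Int) (out : List Int) : Prop := out = cal_draw_down_duration_alt drawdown
instance (drawdown : List Int) (out : List Int) : Decidable (Spec_cal_draw_down_duration drawdown out) := by unfold Spec_cal_draw_down_duration; infer_instance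

-- ===== CLAIM (what is proved, stated in full; the proofs are below) =====
def Claim_equal_cal_draw_down_duration : Prop := ∀ (drawdown : List Int), Dom_cal_draw_down_duration drawdown → Spec_cal_draw_down_duration drawdown (cal_draw_down_duration drawdown)

-- ===== LEMMAS AND PROOFS =====
-- Proof-only helpers: the zero-index list starting at position t, and the recursive segment builder.
def pvZeros (xs : List Int) (t : Int) : List Int :=
  (PySem.List.enumerate xs t).filterMap (fun p => if p.2 = 0 then some p.1 else none)

def pvSegGo : List Int → Int → Int → List Int
  | [], p, n => PySem.List.pyRange 1 (n - p) 1
  | z :: zs, p, n => PySem.List.pyRange 1 (z - p) 1 ++ [z - p - 1] ++ pvSegGo zs z n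

theorem pvZeros_cons (x : Int) (xs : List Int) (t : Int) :
    pvZeros (x :: xs) t
      = (if x = 0 then [t] else []) ++ pvZeros xs (t + 1) := by
  by_cases hx : x = 0 <;>
    simp [pvZeros, PySem.List.enumerate_cons, hx]

-- B's foldl over the zero list, with the final tail range appended, equals the recursive segment builder.
theorem pv_foldl_seg (zs : List Int) :
    ∀ (p : Int) (acc : List Int) (n : Int),
    (zs.foldl
        (fun (acc : List Int × Int) z =>
          (acc.1 ++ PySem.List.pyRange 1 (z - acc.2) 1 ++ [z - acc.2 - 1], z))
        (acc, p)).1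
      ++ PySem.List.pyRange 1 (n - (zs.foldl
        (fun (acc : List Int × Int) z =>
          (acc.1 ++ PySem.List.pyRange 1 (z - acc.2) 1 ++ [z - acc.2 - 1], z))
        (acc, p)).2) 1
      = acc ++ pvSegGo zs p n := by
  induction zs with
  | nil => intro p acc n; simp [pvSegGo]
  | cons z zs ih =>
      intro p acc n
      simp only [List.foldl_cons]
      rw [ih]
      simp [pvSegGo]

-- Main invariant: the segment builder over zeros at absolute positions ≥ t, with previous zero at p < t,
-- reproduces a leading range [1 .. t-p-1] followed by A's loop run with streak t-p-1.
theorem pv_seg_loop (xs : List Int) :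
    ∀ (t p : Int), p < t →
    pvSegGo (pvZeros xs t) p (t + xs.length)
      = PySem.List.pyRange 1 (t - p) 1 ++ cal_draw_down_duration_loop xs (t - p - 1) := by
  induction xs with
  | nil =>
      intro t p _
      simp [pvZeros, PySem.List.enumerate_nil, pvSegGo, cal_draw_down_duration_loop]
  | cons x xs ih =>
      intro t p hpt
      rw [pvZeros_cons]
      by_cases hx : x = 0
      · simp only [hx]
        show pvSegGo (t :: pvZeros xs (t + 1)) p ((t : Int) + (x :: xs).length) = _
        have hn : ((t : Int) + (x :: xs).length) = (t + 1) + (xs.length : Int) := by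
          simp; ring
        rw [pvSegGo, hn, ih (t + 1) t (by omega)]
        have : (t + 1 - t : Int) = 1 := by ring
        rw [this]
        have h1 : PySem.List.pyRange 1 1 1 = [] := PySem.List.pyRange_one_eq_nil (by omega)
        have h2 : (t + 1 - t - 1 : Int) = 0 := by ring
        simp [cal_draw_down_duration_loop, h1]
      · simp only [if_neg hx, List.nil_append]
        have hn : ((t : Int) + (x :: xs).length) = (t + 1) + (xs.length : Int) := by
          simp; ring
        rw [hn, ih (t + 1) p (by omega)]
        have hsplit : PySem.List.pyRange 1 (t + 1 - p) 1
            = PySem.List.pyRange 1 (t - p) 1 ++ [t - p] := by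
          have : (t + 1 - p : Int) = (t - p) + 1 := by ring
          rw [this]
          exact PySem.List.pyRange_one_succ_right (by omega)
        rw [hsplit]
        have h3 : (t + 1 - p - 1 : Int) = (t - p - 1) + 1 := by ring
        simp [cal_draw_down_duration_loop, hx, h3]

-- B's definition equals the recursive segment builder seeded at previous zero -1.
theorem pv_alt_eq (xs : List Int) :
    cal_draw_down_duration_alt xs = pvSegGo (pvZeros xs 0) (-1) (xs.length : Int) := by
  have h := pv_foldl_seg (pvZeros xs 0) (-1) [] (xs.length : Int)
  simp only [List.nil_append] at h
  exact h

-- ===== VERDICT (by name: the statement is the Claim_ definition above) =====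
theorem cal_draw_down_duration_spec : Claim_equal_cal_draw_down_duration := by
  intro drawdown _
  unfold Spec_cal_draw_down_duration cal_draw_down_duration
  rw [pv_alt_eq]
  have h := pv_seg_loop drawdown 0 (-1) (by omega)
  have h1 : PySem.List.pyRange 1 (0 - (-1) : Int) 1 = [] :=
    PySem.List.pyRange_one_eq_nil (by omega)
  simp only [zero_add, h1, List.nil_append] at h
  have h2 : (0 - (-1) - 1 : Int) = 0 := by ring
  rw [h2] at h
  exact h.symm
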